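-- pv_equiv track=rewrite | github.com/chiho001/Baekjoon-Algorithm | 9037.py | teacher
-- ===== SOURCE A (Python) =====
-- def teacher(N,candy):
--     for i in range(N):
--         if candy[i] % 2:
--             candy[i] +=1
--         if i == N-1:
--             candy[i] = candy[i] // 2
--             candy[0] += candy[i] // 2
--         else:
--             candy[i] = candy[i] // 2
--             candy[i+1] += candy[i] // 2
--     return candy
-- ===== SOURCE B (Python) =====
-- def teacher(N, candy):
--     # Staged re-implementation: (1) prefix-scan a table of incoming carries,
--     # (2) elementwise map producing each new amount, (3) add the final carry
--     # to the head.  Uses the identities ceil(v/2) == (v+1)//2 and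
--     # ((v+1)//2)//2 == (v+1)//4, so no parity branch is needed.
--     # (A mutates its argument in place; equivalence is about the return value.)
--     if N <= 0:
--         return list(candy)
--     carries = [0]
--     for c in candy[:N-1]:
--         carries.append((c + carries[-1] + 1) // 4)
--     fin = (candy[N-1] + carries[-1] + 1) // 4
--     head = [(c + k + 1) // 2 for c, k in zip(candy[:N], carries)]
--     head[0] += fin
--     return head + candy[N:]
-- ===== Notes on version B (the rewrite author's own statement) =====
-- stated objective: alternative
-- what changed: B is staged instead of A's single in-place mutating loop: a prefix scan first builds the whole table of incoming carries using the branch-free identities ceil(v/2)=(v+1)//2 and ((v+1)//2)//2=(v+1)//4, then an elementwise zip/map computes the new amounts, and the final carry is added to the head once; A's parity test, +1 increment and neighbour writes disappear.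
import Mathlib
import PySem

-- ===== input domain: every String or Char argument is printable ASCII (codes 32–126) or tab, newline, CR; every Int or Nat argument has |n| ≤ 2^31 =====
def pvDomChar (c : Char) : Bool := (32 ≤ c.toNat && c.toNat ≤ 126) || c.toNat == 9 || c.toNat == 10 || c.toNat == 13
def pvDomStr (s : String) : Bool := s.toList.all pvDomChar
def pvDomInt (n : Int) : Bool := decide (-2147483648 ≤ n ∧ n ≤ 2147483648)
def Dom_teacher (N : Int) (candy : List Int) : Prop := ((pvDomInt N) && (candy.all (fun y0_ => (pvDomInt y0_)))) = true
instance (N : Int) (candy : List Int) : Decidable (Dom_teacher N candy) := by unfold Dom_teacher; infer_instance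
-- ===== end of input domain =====

-- B replaces A's single in-place mutating loop by staged passes (carry table, then an
-- elementwise map, then one head fix-up) with branch-free arithmetic.
-- A mutates its argument in place; the equivalence proved is about the return value.

-- ===== PORT A =====
-- one loop iteration of A: reads/writes the state list by index, last iteration wraps to index 0
def teacherStep (N : Int) (st : List Int) (i : Int) : List Int :=
  let c0 := PySem.List.pyGetD st i 0
  let c := if PySem.Int.mod c0 2 ≠ 0 then c0 + 1 else c0
  if i = N - 1 then
    let h := PySem.Int.floordiv c 2
    let st1 := PySem.List.pySetD st i h
    PySem.List.pySetD st1 0 (PySem.List.pyGetD st1 0 0 + PySem.Int.floordiv h 2)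
  else
    let h := PySem.Int.floordiv c 2
    let st1 := PySem.List.pySetD st i h
    PySem.List.pySetD st1 (i + 1) (PySem.List.pyGetD st1 (i + 1) 0 + PySem.Int.floordiv h 2)

def teacher (N : Int) (candy : List Int) : List Int :=
  (PySem.List.pyRange 0 N 1).foldl (teacherStep N) candy

-- ===== PORT B =====
def teacher_alt (N : Int) (candy : List Int) : List Int :=
  if N ≤ 0 then candy
  else
    let carries := (PySem.List.slice candy none (some (N - 1))).foldl
        (fun ks c => ks ++ [PySem.Int.floordiv (c + ks.getLastD 0 + 1) 4]) [0]
    let fin := PySem.Int.floordiv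
        (PySem.List.pyGetD candy (N - 1) 0 + carries.getLastD 0 + 1) 4
    let head := ((PySem.List.slice candy none (some N)).zip carries).map
        (fun p => PySem.Int.floordiv (p.1 + p.2 + 1) 2)
    (match head with
     | [] => []            -- unreachable under Pre_teacher (0 < N ≤ length forces a nonempty head)
     | h :: t => (h + fin) :: t) ++ PySem.List.slice candy (some N) none

-- ===== PRECONDITION & SPEC =====
-- Pre_ excludes exactly N > len(candy), where A raises IndexError inside the loop.
def Pre_teacher (N : Int) (candy : List Int) : Prop := N ≤ (candy.length : Int)
instance (N : Int) (candy : List Int) : Decidable (Pre_teacher N candy) := by unfold Pre_teacher; infer_instance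
def pvWitness_teacher : Int × List Int := (3, [3, 5, 8])

def Spec_teacher (N : Int) (candy : List Int) (out : List Int) : Prop := out = teacher_alt N candy
instance (N : Int) (candy : List Int) (out : List Int) : Decidable (Spec_teacher N candy out) := by unfold Spec_teacher; infer_instance

-- ===== CLAIM (what is proved, stated in full; the proofs are below) =====
def Claim_equal_teacher : Prop := ∀ (N : Int) (candy : List Int), Dom_teacher N candy → Pre_teacher N candy → Spec_teacher N candy (teacher N candy)

-- ===== LEMMAS AND PROOFS =====

-- carry-processing of a whole list with A's per-step arithmetic (proof helper)
def runA (carry : Int) : List Int → List Int × Int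
  | [] => ([], carry)
  | c :: rest =>
    let v0 := c + carry
    let v := if PySem.Int.mod v0 2 ≠ 0 then v0 + 1 else v0
    let h := PySem.Int.floordiv v 2
    let p := runA (PySem.Int.floordiv h 2) rest
    (h :: p.1, p.2)

-- carry-processing with B's branch-free arithmetic (proof helper)
def runB (carry : Int) : List Int → List Int × Int
  | [] => ([], carry)
  | c :: rest =>
    let p := runB (PySem.Int.floordiv (c + carry + 1) 4) rest
    (PySem.Int.floordiv (c + carry + 1) 2 :: p.1, p.2)

-- the carries generated after an initial carry k (proof helper)
def tailC (k : Int) : List Int → List Int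
  | [] => []
  | c :: rest => PySem.Int.floordiv (c + k + 1) 4 :: tailC (PySem.Int.floordiv (c + k + 1) 4) rest

-- add cf to the head of a list
def bump (l : List Int) (cf : Int) : List Int :=
  match l with
  | [] => []
  | h :: t => (h + cf) :: t

theorem step_arith (v : Int) :
    PySem.Int.floordiv (if PySem.Int.mod v 2 ≠ 0 then v + 1 else v) 2 = PySem.Int.floordiv (v + 1) 2
    ∧ PySem.Int.floordiv (PySem.Int.floordiv (if PySem.Int.mod v 2 ≠ 0 then v + 1 else v) 2) 2
        = PySem.Int.floordiv (v + 1) 4 := by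
  simp only [PySem.Int.mod_eq_emod_of_pos (show (0:Int) < 2 by omega),
    PySem.Int.floordiv_eq_ediv_of_pos (show (0:Int) < 2 by omega),
    PySem.Int.floordiv_eq_ediv_of_pos (show (0:Int) < 4 by omega)]
  constructor <;> (split_ifs with h <;> omega)

theorem runA_eq_runB (l : List Int) : ∀ k, runA k l = runB k l := by
  induction l with
  | nil => intro k; rfl
  | cons c rest ih =>
    intro k
    simp only [runA, runB]
    rw [(step_arith (c + k)).2, (step_arith (c + k)).1, ih]

-- B's carries fold builds k followed by tailC k l
theorem fold_carries (l : List Int) : ∀ (ks : List Int) (k : Int),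
    l.foldl (fun ks c => ks ++ [PySem.Int.floordiv (c + ks.getLastD 0 + 1) 4]) (ks ++ [k])
      = (ks ++ [k]) ++ tailC k l := by
  induction l with
  | nil => intro ks k; simp [tailC]
  | cons c rest ih =>
    intro ks k
    simp only [List.foldl_cons, List.getLastD_concat]
    have := ih (ks ++ [k]) (PySem.Int.floordiv (c + k + 1) 4)
    simp only [List.append_assoc] at this ⊢
    rw [this]
    simp [tailC]

-- runB's output is the elementwise map over the zip with the carries, and its
-- final carry is computed from the last element and the last carry
theorem runB_zip (l : List Int) : ∀ (k x : Int),
    runB k (l ++ [x])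
      = (((l ++ [x]).zip (k :: tailC k l)).map
           (fun p => PySem.Int.floordiv (p.1 + p.2 + 1) 2),
         PySem.Int.floordiv (x + (k :: tailC k l).getLastD 0 + 1) 4) := by
  induction l with
  | nil => intro k x; simp [runB, tailC]
  | cons c rest ih =>
    intro k x
    simp only [List.cons_append, runB, tailC, List.zip_cons_cons, List.map_cons]
    rw [ih, Prod.mk.injEq]
    exact ⟨rfl, by simp [List.getLastD_eq_getLast?, List.getLast?_cons_cons]⟩

theorem length_tailC (l : List Int) : ∀ k, (tailC k l).length = l.length := by
  induction l with
  | nil => intro k; rfl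
  | cons c rest ih => intro k; simp [tailC, ih]

theorem getD_app (pre : List Int) (c : Int) (rest : List Int) :
    PySem.List.pyGetD (pre ++ c :: rest) (pre.length : Int) 0 = c := by
  rw [PySem.List.pyGetD_natCast]
  simp

theorem setD_app (pre : List Int) (c : Int) (rest : List Int) (v : Int) :
    PySem.List.pySetD (pre ++ c :: rest) (pre.length : Int) v = pre ++ v :: rest := by
  rw [PySem.List.pySetD_natCast]
  induction pre with
  | nil => rfl
  | cons p ps ih => simp [ih]

-- main invariant: the remaining iterations of A's loop compute runA and bump index 0 at the end
theorem loop_inv (N : Int) : ∀ (m : Nat) (pre : List Int) (x : Int) (rest : List Int) (carry : Int),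
    ((pre.length : Int) + (m : Int)) + 1 = N → m ≤ rest.length →
    (PySem.List.pyRange (pre.length : Int) N 1).foldl (teacherStep N) (pre ++ (x + carry) :: rest)
      = bump (pre ++ (runA carry (x :: rest.take m)).1 ++ rest.drop m)
             (runA carry (x :: rest.take m)).2 := by
  intro m
  induction m with
  | zero =>
    intro pre x rest carry hN _
    have h1 : (pre.length : Int) < N := by omega
    rw [PySem.List.pyRange_one_cons h1, PySem.List.pyRange_one_eq_nil (by omega : N ≤ (pre.length : Int) + 1)]
    simp only [List.foldl_cons, List.foldl_nil, teacherStep, getD_app]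
    rw [if_pos (by omega : (pre.length : Int) = N - 1)]
    rw [setD_app]
    set h := PySem.Int.floordiv (if PySem.Int.mod (x + carry) 2 ≠ 0 then x + carry + 1 else x + carry) 2 with hh
    simp only [runA, List.take_zero, List.drop_zero, bump]
    cases pre with
    | nil =>
      have : PySem.List.pyGetD (([] : List Int) ++ h :: rest) 0 0 = h := getD_app [] h rest
      rw [List.nil_append, List.nil_append]
      have hs := setD_app ([] : List Int) h rest (h + PySem.Int.floordiv h 2)
      simp only [List.nil_append, List.length_nil, Nat.cast_zero] at this hs ⊢
      rw [this, hs]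
      simp [hh]
    | cons p ps =>
      have hg : PySem.List.pyGetD (([] : List Int) ++ p :: (ps ++ h :: rest)) ((List.length ([] : List Int) : Nat) : Int) 0 = p := getD_app [] p (ps ++ h :: rest)
      have hs := setD_app ([] : List Int) p (ps ++ h :: rest) (p + PySem.Int.floordiv h 2)
      simp only [List.nil_append, List.length_nil, Nat.cast_zero] at hg hs
      rw [show (p :: ps) ++ h :: rest = p :: (ps ++ h :: rest) from rfl, hg, hs]
      simp [hh]
  | succ m ih =>
    intro pre x rest carry hN hm
    obtain ⟨r0, rest', rfl⟩ : ∃ r0 rest', rest = r0 :: rest' := by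
      cases rest with
      | nil => simp at hm
      | cons a b => exact ⟨a, b, rfl⟩
    have h1 : (pre.length : Int) < N := by push_cast at hN; omega
    rw [PySem.List.pyRange_one_cons h1]
    simp only [List.foldl_cons, teacherStep, getD_app]
    rw [if_neg (by push_cast at hN; omega : ¬ (pre.length : Int) = N - 1)]
    rw [setD_app]
    set h := PySem.Int.floordiv (if PySem.Int.mod (x + carry) 2 ≠ 0 then x + carry + 1 else x + carry) 2 with hh
    have e1 : pre ++ h :: r0 :: rest' = (pre ++ [h]) ++ r0 :: rest' := by simp
    have ecast : (pre.length : Int) + 1 = (((pre ++ [h]).length : Nat) : Int) := by simp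
    rw [e1, ecast, getD_app (pre ++ [h]) r0 rest', setD_app (pre ++ [h]) r0 rest']
    have hN' : (((pre ++ [h]).length : Nat) : Int) + (m : Int) + 1 = N := by
      simp; push_cast at hN; omega
    have hm' : m ≤ rest'.length := by simp at hm; omega
    have := ih (pre ++ [h]) r0 rest' (PySem.Int.floordiv h 2) hN' hm'
    rw [this]
    simp only [runA, List.take_succ_cons, List.drop_succ_cons]
    simp [hh]

-- ===== VERDICT (by name: the statement is the Claim_ definition above) =====
theorem teacher_spec : Claim_equal_teacher := by
  intro N candy _ hpre
  unfold Spec_teacher teacher teacher_alt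
  by_cases hN : 0 < N
  · rw [if_neg (by omega : ¬ N ≤ 0)]
    obtain ⟨x, rest, rfl⟩ : ∃ x rest, candy = x :: rest := by
      cases candy with
      | nil => exfalso; unfold Pre_teacher at hpre; simp at hpre; omega
      | cons a b => exact ⟨a, b, rfl⟩
    have hlen : N ≤ (rest.length : Int) + 1 := by
      unfold Pre_teacher at hpre; simpa [Int.add_comm] using hpre
    set m : Nat := N.toNat - 1 with hm
    have h2 : m ≤ rest.length := by omega
    have hinv := loop_inv N m [] x rest 0 (by simp [hm]; omega) h2
    simp only [List.nil_append, List.length_nil, Nat.cast_zero, Int.add_zero] at hinv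
    rw [hinv, runA_eq_runB]
    have hmlt : m < (x :: rest).length := by simp; omega
    have hcm : (x :: rest)[m]? = some (x :: rest)[m] := List.getElem?_eq_getElem hmlt
    set cm : Int := (x :: rest)[m] with hcmdef
    have htake : (x :: rest).take (m + 1) = (x :: rest).take m ++ [cm] := by
      rw [List.take_add_one, hcm]; rfl
    have hsl1 : PySem.List.slice (x :: rest) none (some (N - 1)) = (x :: rest).take m := by
      rw [PySem.List.slice_to (x :: rest) (by omega : (0:Int) ≤ N - 1)]
      congr 1; omega
    have hsl2 : PySem.List.slice (x :: rest) none (some N) = (x :: rest).take m ++ [cm] := by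
      rw [PySem.List.slice_to (x :: rest) (by omega : (0:Int) ≤ N), show N.toNat = m + 1 by omega, htake]
    have hsl3 : PySem.List.slice (x :: rest) (some N) none = rest.drop m := by
      rw [PySem.List.slice_from (x :: rest) (by omega : (0:Int) ≤ N), show N.toNat = m + 1 by omega]
      rfl
    have hgetD : PySem.List.pyGetD (x :: rest) (N - 1) 0 = cm := by
      rw [show N - 1 = ((m : Nat) : Int) by omega, PySem.List.pyGetD_natCast]
      simp [List.getD_eq_getElem?_getD, hcm]
    have hfold := fold_carries ((x :: rest).take m) [] 0
    simp only [List.nil_append] at hfold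
    have htake' : x :: rest.take m = (x :: rest).take m ++ [cm] := by
      rw [← htake]; rfl
    rw [htake', runB_zip]
    simp only [hsl1, hsl2, hsl3, hgetD, hfold, List.singleton_append]
    cases hM : ((((x :: rest).take m ++ [cm]).zip (0 :: tailC 0 ((x :: rest).take m))).map
        (fun p => PySem.Int.floordiv (p.1 + p.2 + 1) 2)) with
    | nil =>
      exfalso
      have := congrArg List.length hM
      simp [length_tailC] at this
    | cons h t =>
      rfl
  · rw [PySem.List.pyRange_one_eq_nil (by omega : N ≤ 0)]
    rw [if_pos (by omega : N ≤ 0)]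
    rfl
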